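-- pv_equiv track=rewrite | github.com/avidprogrammer/km | codility/skyline2.py | check_for_blk
-- ===== SOURCE A (Python) =====
-- def add_to_stack(stack, h, blks):
--     stack.append(h)
--     blks += 1
--     return stack, blks
--
-- def check_for_blk(stack, h, blks):
--     if not stack:
--         stack, blks = add_to_stack(stack, h, blks)
--     elif h < stack[-1]:
--         stack.pop()
--         stack, blks = check_for_blk(stack, h, blks)
--     elif h > stack[-1]:
--         stack, blks = add_to_stack(stack, h, blks)
--     return stack, blks
-- ===== SOURCE B (Python) =====
-- def check_for_blk(stack, h, blks):
--     while stack and h < stack[-1]: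
--         stack.pop()
--     if not stack or h > stack[-1]:
--         stack.append(h)
--         blks += 1
--     return stack, blks
-- ===== Notes on version B (the rewrite author's own statement) =====
-- stated objective: idiomatic
-- what changed: Replaces the recursive helper-based popping (recursive call after each single pop, plus add_to_stack helper) with a single explicit while-loop that pops all larger tops, then one inlined conditional append; same in-place mutation of stack.
import Mathlib
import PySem

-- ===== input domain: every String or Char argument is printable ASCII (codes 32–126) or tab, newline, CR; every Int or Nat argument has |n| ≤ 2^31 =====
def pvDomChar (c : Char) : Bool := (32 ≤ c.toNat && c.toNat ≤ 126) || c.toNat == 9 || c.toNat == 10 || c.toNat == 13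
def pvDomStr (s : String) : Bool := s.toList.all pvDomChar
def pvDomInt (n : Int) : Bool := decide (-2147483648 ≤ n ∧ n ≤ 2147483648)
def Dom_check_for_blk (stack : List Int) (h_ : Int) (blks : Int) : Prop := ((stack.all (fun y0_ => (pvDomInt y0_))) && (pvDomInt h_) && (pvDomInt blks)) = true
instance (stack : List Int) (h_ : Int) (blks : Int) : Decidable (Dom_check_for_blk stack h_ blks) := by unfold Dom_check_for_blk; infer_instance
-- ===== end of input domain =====

-- B inlines the helper and replaces the one-pop-per-recursive-call structure by an
-- explicit while-loop that pops all larger tops, then one conditional append.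
-- Both Pythons mutate `stack` in place; the equivalence proved here is about the return value.

-- ===== PORT A =====
-- helper add_to_stack: append h, increment blks
def add_to_stack (stack : List Int) (h_ : Int) (blks : Int) : List Int × Int :=
  (stack ++ [h_], blks + 1)

def check_for_blk (stack : List Int) (h_ : Int) (blks : Int) : List Int × Int :=
  match hl : stack.getLast? with
  | none => add_to_stack stack h_ blks          -- `if not stack`
  | some t =>
    if h_ < t then
      -- stack.pop(); recursive call
      check_for_blk stack.dropLast h_ blks
    else if h_ > t then
      add_to_stack stack h_ blks
    else
      (stack, blks)
termination_by stack.length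
decreasing_by
  · have hne : stack ≠ [] := by intro h; simp [h] at hl
    have := List.length_pos_iff.mpr hne
    simp [List.length_dropLast]; omega

-- ===== PORT B =====
-- `while stack and h < stack[-1]: stack.pop()`
def pyPopWhile (stack : List Int) (h_ : Int) : List Int :=
  match hl : stack.getLast? with
  | some t =>
    if h_ < t then pyPopWhile stack.dropLast h_ else stack
  | none => stack
termination_by stack.length
decreasing_by
  · have hne : stack ≠ [] := by intro h; simp [h] at hl
    have := List.length_pos_iff.mpr hne
    simp [List.length_dropLast]; omega

def check_for_blk_alt (stack : List Int) (h_ : Int) (blks : Int) : List Int × Int :=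
  let s := pyPopWhile stack h_
  match s.getLast? with
  | none => (s ++ [h_], blks + 1)
  | some t => if h_ > t then (s ++ [h_], blks + 1) else (s, blks)

-- ===== PRECONDITION & SPEC =====
def Spec_check_for_blk (stack : List Int) (h_ : Int) (blks : Int) (out : List Int × Int) : Prop := out = check_for_blk_alt stack h_ blks
instance (stack : List Int) (h_ : Int) (blks : Int) (out : List Int × Int) : Decidable (Spec_check_for_blk stack h_ blks out) := by unfold Spec_check_for_blk; infer_instance

-- ===== CLAIM (what is proved, stated in full; the proofs are below) =====
def Claim_equal_check_for_blk : Prop := ∀ (stack : List Int) (h_ : Int) (blks : Int), Dom_check_for_blk stack h_ blks → Spec_check_for_blk stack h_ blks (check_for_blk stack h_ blks)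

-- ===== LEMMAS AND PROOFS =====

theorem check_eq_alt (stack : List Int) (h_ : Int) (blks : Int) :
    check_for_blk stack h_ blks = check_for_blk_alt stack h_ blks := by
  induction hn : stack.length using Nat.strong_induction_on generalizing stack with
  | _ n ih =>
  rw [check_for_blk]
  split
  · next hl =>
    have hs : stack = [] := List.getLast?_eq_none_iff.mp hl
    simp [check_for_blk_alt, pyPopWhile, hs, add_to_stack]
  · next t hl =>
    by_cases hlt : h_ < t
    · simp only [hlt, if_true]
      have hne : stack ≠ [] := by rintro rfl; simp at hl
      have hlen : stack.dropLast.length < n := by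
        subst hn
        have := List.length_pos_iff.mpr hne
        simp [List.length_dropLast]; omega
      rw [ih _ hlen _ rfl]
      have hpop : pyPopWhile stack h_ = pyPopWhile stack.dropLast h_ := by
        rw [pyPopWhile]; split <;> simp_all
      simp only [check_for_blk_alt, hpop]
    · have hpop : pyPopWhile stack h_ = stack := by
        rw [pyPopWhile]; split <;> simp_all
      simp only [check_for_blk_alt, hpop, hl, add_to_stack]
      split <;> simp_all

-- ===== VERDICT (by name: the statement is the Claim_ definition above) =====
theorem check_for_blk_spec : Claim_equal_check_for_blk := by
  intro stack h_ blks _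
  unfold Spec_check_for_blk
  exact check_eq_alt stack h_ blks
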